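-- pv_equiv track=rewrite | github.com/24anisha/plum | plum/harnesslib/languages/parsers.py | keep_until_unmatched_rbrace
-- ===== SOURCE A (Python) =====
-- from typing import Tuple
--
-- def keep_until_unmatched_rbrace(source: str) -> Tuple[str, str]:
--     """
--     Return the prefix of `source` up to (but not including) the first unmatched closing brace.
--     If there are no unmatched closing braces, return the whole source.
--     The current implementation is somewhat heuristic; it does not try to recognize braces in
--     strings, comments, or regular expressions.
--     """
--     open_braces = 0
--     for i in range(0, len(source)):
--         if source[i] == '}':
--             if open_braces == 0:
--                 return source[:i], source[i:]
--             open_braces -= 1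
--         elif source[i] == '{':
--             open_braces += 1
--     return source, ""
-- ===== SOURCE B (Python) =====
-- from typing import Tuple
--
-- def keep_until_unmatched_rbrace(source: str) -> Tuple[str, str]:
--     deltas = [1 if c == '{' else -1 if c == '}' else 0 for c in source]
--     bal = 0
--     sums = []
--     for d in deltas:
--         bal += d
--         sums.append(bal)
--     try:
--         i = sums.index(-1)
--     except ValueError:
--         return source, ""
--     return source[:i], source[i:]
-- ===== Notes on version B (the rewrite author's own statement) =====
-- stated objective: alternative
-- what changed: Replaces the counter-with-early-return character loop by a map/prefix-sum/index pipeline: map each char to a +1/-1/0 delta, build the running balance list, and split at the first index where the balance reaches -1.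
import Mathlib
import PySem

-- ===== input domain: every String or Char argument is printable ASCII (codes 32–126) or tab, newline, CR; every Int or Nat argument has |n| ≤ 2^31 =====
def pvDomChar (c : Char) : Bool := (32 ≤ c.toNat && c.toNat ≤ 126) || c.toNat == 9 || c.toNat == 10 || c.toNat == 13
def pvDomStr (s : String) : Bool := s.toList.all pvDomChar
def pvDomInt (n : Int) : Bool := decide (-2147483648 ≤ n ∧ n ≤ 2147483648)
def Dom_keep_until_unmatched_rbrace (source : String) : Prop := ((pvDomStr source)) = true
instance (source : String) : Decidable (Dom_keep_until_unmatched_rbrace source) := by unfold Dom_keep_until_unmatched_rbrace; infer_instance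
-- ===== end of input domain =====

-- B replaces A's counter loop with early return by a map / prefix-sum / first-index pipeline (objective: alternative, same cost).

-- ===== PORT A =====
-- the indexed for-loop of A, carrying the mutable counter open_braces
def pvLoopA (s : List Char) (i : Nat) (open_braces : Int) : String × String :=
  if h : i < s.length then
    if s[i] = '}' then
      if open_braces = 0 then (String.ofList (s.take i), String.ofList (s.drop i))
      else pvLoopA s (i + 1) (open_braces - 1)
    else if s[i] = '{' then pvLoopA s (i + 1) (open_braces + 1)
    else pvLoopA s (i + 1) open_braces
  else (String.ofList s, "")
termination_by s.length - i

def keep_until_unmatched_rbrace (source : String) : String × String :=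
  pvLoopA source.toList 0 0

-- ===== PORT B =====
-- delta of one character, as in B's list comprehension
def pvDelta (c : Char) : Int := if c = '{' then 1 else if c = '}' then -1 else 0

-- running-balance list: B's accumulation loop over the deltas
def pvSums (s : List Char) (bal : Int) : List Int :=
  match s with
  | [] => []
  | c :: cs => (bal + pvDelta c) :: pvSums cs (bal + pvDelta c)

def keep_until_unmatched_rbrace_alt (source : String) : String × String :=
  let s := source.toList
  match PySem.List.index? (pvSums s 0) (-1) with
  | some i => (String.ofList (s.take i), String.ofList (s.drop i))
  | none => (source, "")

-- ===== PRECONDITION & SPEC =====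
def Spec_keep_until_unmatched_rbrace (source : String) (out : String × String) : Prop := out = keep_until_unmatched_rbrace_alt source
instance (source : String) (out : String × String) : Decidable (Spec_keep_until_unmatched_rbrace source out) := by unfold Spec_keep_until_unmatched_rbrace; infer_instance

-- ===== CLAIM (what is proved, stated in full; the proofs are below) =====
def Claim_equal_keep_until_unmatched_rbrace : Prop := ∀ (source : String), Dom_keep_until_unmatched_rbrace source → Spec_keep_until_unmatched_rbrace source (keep_until_unmatched_rbrace source)

-- ===== LEMMAS AND PROOFS =====

def pvBal (s : List Char) : Int := s.foldl (fun b c => b + pvDelta c) 0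

lemma pvIndex?_append_cons_self (l rest : List Int) (h : (-1 : Int) ∉ l) :
    PySem.List.index? (l ++ (-1) :: rest) (-1) = some l.length := by
  rw [PySem.List.index?_eq_some_iff]
  exact ⟨l, rest, rfl, rfl, h⟩

lemma pvSums_append (xs ys : List Char) (bal : Int) :
    pvSums (xs ++ ys) bal = pvSums xs bal ++ pvSums ys (xs.foldl (fun b c => b + pvDelta c) bal) := by
  induction xs generalizing bal with
  | nil => simp [pvSums]
  | cons c cs ih => simp [pvSums, ih]

lemma pvBal_take_succ (s : List Char) (i : Nat) (h : i < s.length) :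
    pvBal (s.take (i + 1)) = pvBal (s.take i) + pvDelta s[i] := by
  have ht : s.take (i + 1) = s.take i ++ [s[i]] := by
    rw [List.take_succ, List.getElem?_eq_getElem h]; rfl
  unfold pvBal
  rw [ht, List.foldl_append]
  rfl

lemma pvMain (s : List Char) (i : Nat) (ob : Int)
    (hi : i ≤ s.length)
    (hob : ob = pvBal (s.take i))
    (hnn : 0 ≤ ob)
    (hnot : (-1 : Int) ∉ pvSums (s.take i) 0) :
    pvLoopA s i ob =
      match PySem.List.index? (pvSums s 0) (-1) with
      | some k => (String.ofList (s.take k), String.ofList (s.drop k))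
      | none => (String.ofList s, "") := by
  have hdec : s.length - i ≠ 0 → s.length - (i + 1) < s.length - i := by omega
  by_cases h : i < s.length
  · -- take (i+1) = take i ++ [s[i]]
    have htake : s.take (i + 1) = s.take i ++ [s[i]] := by
      rw [List.take_succ, List.getElem?_eq_getElem h]; rfl
    have hsum1 : pvSums (s.take (i + 1)) 0 = pvSums (s.take i) 0 ++ [pvBal (s.take i) + pvDelta s[i]] := by
      rw [htake, pvSums_append]; rfl
    have hbal1 : pvBal (s.take (i + 1)) = ob + pvDelta s[i] := by
      rw [pvBal_take_succ s i h, hob]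
    by_cases hc : s[i] = '}'
    · by_cases hz : ob = 0
      · -- A returns here; show B's index? finds exactly i
        have hd : pvDelta s[i] = -1 := by simp [pvDelta, hc]
        have hfull : pvSums s 0 = pvSums (s.take i) 0 ++ pvSums (s.drop i) (pvBal (s.take i)) := by
          conv_lhs => rw [← List.take_append_drop i s]
          rw [pvSums_append]; rfl
        have hdropcons : s.drop i = s[i] :: s.drop (i + 1) := by
          rw [List.drop_eq_getElem_cons h]
        have hhead : pvSums (s.drop i) (pvBal (s.take i)) =
            (-1 : Int) :: pvSums (s.drop (i + 1)) (-1) := by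
          rw [hdropcons]
          simp [pvSums, hd, ← hob, hz]
        have hidx : PySem.List.index? (pvSums s 0) (-1) = some (pvSums (s.take i) 0).length := by
          rw [hfull, hhead]
          exact pvIndex?_append_cons_self _ _ hnot
        have hlen : (pvSums (s.take i) 0).length = i := by
          have : ∀ (t : List Char) (b : Int), (pvSums t b).length = t.length := by
            intro t; induction t with
            | nil => intro b; rfl
            | cons c cs ih => intro b; simp [pvSums, ih]
          rw [this, List.length_take_of_le (le_of_lt h)]
        rw [pvLoopA]
        simp only [h, dif_pos, hc, if_pos, hz]
        rw [hidx, hlen]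
      · -- matched '}': counter decreases, balance stays ≥ 0 and never hits -1 here
        have hd : pvDelta s[i] = -1 := by simp [pvDelta, hc]
        rw [pvLoopA]
        simp only [h, dif_pos, hc, if_pos, hz]
        exact pvMain s (i + 1) (ob - 1) h
          (by rw [hbal1, hd]; ring)
          (by omega)
          (by
            rw [hsum1]
            intro hmem
            rcases List.mem_append.mp hmem with hm | hm
            · exact hnot hm
            · have h9 : (-1 : Int) = pvBal (s.take i) + pvDelta s[i] := by simpa using hm
              rw [← hob, hd] at h9; omega)
    · by_cases hc2 : s[i] = '{'
      · have hd : pvDelta s[i] = 1 := by simp [pvDelta, hc2]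
        rw [pvLoopA]
        simp only [h, dif_pos, hc2, if_neg]
        exact pvMain s (i + 1) (ob + 1) h
          (by rw [hbal1, hd])
          (by omega)
          (by
            rw [hsum1]
            intro hmem
            rcases List.mem_append.mp hmem with hm | hm
            · exact hnot hm
            · have h9 : (-1 : Int) = pvBal (s.take i) + pvDelta s[i] := by simpa using hm
              rw [← hob, hd] at h9; omega)
      · have hd : pvDelta s[i] = 0 := by simp [pvDelta, hc, hc2]
        rw [pvLoopA]
        simp only [h, dif_pos, hc, if_neg, hc2, not_false_iff]
        exact pvMain s (i + 1) ob h
          (by rw [hbal1, hd]; ring)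
          hnn
          (by
            rw [hsum1]
            intro hmem
            rcases List.mem_append.mp hmem with hm | hm
            · exact hnot hm
            · have h9 : (-1 : Int) = pvBal (s.take i) + pvDelta s[i] := by simpa using hm
              rw [← hob, hd] at h9; omega)
  · -- i = length: A falls off the loop; B's index? must be none
    have hi' : i = s.length := by omega
    have htk : s.take i = s := by rw [hi', List.take_length]
    have hnone : PySem.List.index? (pvSums s 0) (-1) = none := by
      rw [PySem.List.index?_eq_none_iff]
      rw [← htk]; exact hnot
    rw [pvLoopA]
    simp only [h, dif_neg, not_false_iff]
    rw [hnone]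
termination_by s.length - i

-- ===== VERDICT (by name: the statement is the Claim_ definition above) =====
theorem keep_until_unmatched_rbrace_spec : Claim_equal_keep_until_unmatched_rbrace := by
  intro source _
  unfold Spec_keep_until_unmatched_rbrace keep_until_unmatched_rbrace keep_until_unmatched_rbrace_alt
  have := pvMain source.toList 0 0 (Nat.zero_le _) (by simp [pvBal]) le_rfl
    (by simp [pvSums])
  rw [this]
  cases hidx : PySem.List.index? (pvSums source.toList 0) (-1) with
  | none =>
    rw [PySem.List.index?_eq_idxOf?] at hidx
    simp [hidx, String.ofList_toList]
  | some k =>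
    rw [PySem.List.index?_eq_idxOf?] at hidx
    simp [hidx]
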